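-- pv_equiv track=rewrite | github.com/kenbockler/Andmeteaduse_masin-ppe_projekt | PROJEKT/K10/S200/2021-11-03-21-09-47/kodu2.py | vertikaal
-- ===== SOURCE A (Python) =====
-- def vertikaal(x,maatriks):
--     j = 0
--     i = 0
--     kokku = 0
--     while j < 4:
--         if (maatriks[i][j] == maatriks[i+1][j] == maatriks[i+2][j] == x):
--             kokku += 1
--         if (maatriks[i+1][j] == maatriks[i+2][j] == maatriks[i+3][j] == x):
--             kokku += 1
--         j+= 1
--     return kokku
-- ===== SOURCE B (Python) =====
-- def vertikaal(x, maatriks):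
--     kokku = 0
--     for j in range(4):
--         run = 0
--         for i in range(4):
--             if maatriks[i][j] == x:
--                 run += 1
--                 if run >= 3:
--                     kokku += 1
--             else:
--                 run = 0
--     return kokku
-- ===== Notes on version B (the rewrite author's own statement) =====
-- stated objective: alternative
-- what changed: B replaces A's two fixed three-cell window tests per column (chained == at rows 0-2 and 1-3) with a single top-to-bottom run-length scan of each column that counts every position where the consecutive run of x reaches length >= 3.
-- outside the precondition, e.g. on vertikaal(5, [[1, 1, 1, 1], [2, 2, 2, 2], [3, 3, 3, 3]]): A returns 0, B raises IndexError; on vertikaal(5, [[1, 1, 1, 1], [2, 2, 2, 2], [3, 3, 3, 3], []]): A returns 0, B raises IndexError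
import Mathlib
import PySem

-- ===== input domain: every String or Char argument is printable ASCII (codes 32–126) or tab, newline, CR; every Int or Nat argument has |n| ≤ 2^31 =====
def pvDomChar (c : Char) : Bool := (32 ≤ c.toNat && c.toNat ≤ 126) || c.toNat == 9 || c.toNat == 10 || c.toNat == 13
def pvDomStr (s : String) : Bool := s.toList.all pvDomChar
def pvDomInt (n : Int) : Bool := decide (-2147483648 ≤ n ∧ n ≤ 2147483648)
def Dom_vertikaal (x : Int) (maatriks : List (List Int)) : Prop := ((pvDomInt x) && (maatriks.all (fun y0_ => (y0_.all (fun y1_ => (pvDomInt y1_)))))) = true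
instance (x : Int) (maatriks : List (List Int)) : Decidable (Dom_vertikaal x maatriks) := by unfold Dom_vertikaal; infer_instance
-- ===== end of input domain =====

-- B counts overlapping vertical triples by a run-length scan down each column instead of
-- A's two fixed window tests per column (objective: alternative algorithm, same cost).
-- ===== PORT A =====
-- maatriks[i][j]; the defaults are only read on inputs outside Pre_vertikaal (where Python raises)
def pvCell (maatriks : List (List Int)) (i j : Nat) : Int := (maatriks.getD i []).getD j 0

-- body of A's while loop for one value of j (i is 0 throughout A)
def vertikaalStep (x : Int) (maatriks : List (List Int)) (kokku : Int) (j : Nat) : Int :=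
  let k :=
    if pvCell maatriks 0 j = pvCell maatriks 1 j ∧ pvCell maatriks 1 j = pvCell maatriks 2 j ∧
       pvCell maatriks 2 j = x then kokku + 1 else kokku
  if pvCell maatriks 1 j = pvCell maatriks 2 j ∧ pvCell maatriks 2 j = pvCell maatriks 3 j ∧
     pvCell maatriks 3 j = x then k + 1 else k

def vertikaal (x : Int) (maatriks : List (List Int)) : Int :=
  (List.range 4).foldl (vertikaalStep x maatriks) 0

-- ===== PORT B =====
-- one row of B's inner loop: extend or reset the consecutive-run counter, count runs ≥ 3
def vertikaalAltStep (x : Int) (maatriks : List (List Int)) (j : Nat) (p : Int × Nat) (i : Nat) : Int × Nat :=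
  if pvCell maatriks i j = x then
    (if p.2 + 1 ≥ 3 then p.1 + 1 else p.1, p.2 + 1)
  else (p.1, 0)

def vertikaal_alt (x : Int) (maatriks : List (List Int)) : Int :=
  (List.range 4).foldl
    (fun kokku j => ((List.range 4).foldl (vertikaalAltStep x maatriks j) (kokku, 0)).1) 0

-- ===== PRECONDITION & SPEC =====
-- Pre_ excludes grids missing a cell: there A either raises IndexError or returns only because
-- its chained == short-circuits past the missing cell, where B (which reads all 16 cells) raises.
def Pre_vertikaal (x : Int) (maatriks : List (List Int)) : Prop :=
  4 ≤ maatriks.length ∧ ∀ i ∈ [0, 1, 2, 3], 4 ≤ (maatriks.getD i []).length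
instance (x : Int) (maatriks : List (List Int)) : Decidable (Pre_vertikaal x maatriks) := by
  unfold Pre_vertikaal; infer_instance

def pvWitness_vertikaal : Int × List (List Int) :=
  (0, [[0, 0, 0, 0], [0, 0, 0, 0], [0, 0, 0, 0], [0, 0, 0, 0]])

def Spec_vertikaal (x : Int) (maatriks : List (List Int)) (out : Int) : Prop := out = vertikaal_alt x maatriks
instance (x : Int) (maatriks : List (List Int)) (out : Int) : Decidable (Spec_vertikaal x maatriks out) := by unfold Spec_vertikaal; infer_instance

-- ===== CLAIM (what is proved, stated in full; the proofs are below) =====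
def Claim_equal_vertikaal : Prop := ∀ (x : Int) (maatriks : List (List Int)), Dom_vertikaal x maatriks → Pre_vertikaal x maatriks → Spec_vertikaal x maatriks (vertikaal x maatriks)

-- ===== LEMMAS AND PROOFS =====

-- one column of a grid with its first four rows wide enough:
-- B's run-length pass equals A's two window tests
lemma col_eq (x : Int) (j : Nat) (r0 r1 r2 r3 : List Int) (rest : List (List Int)) (t : Int)
    (h0 : j < r0.length) (h1 : j < r1.length) (h2 : j < r2.length) (h3 : j < r3.length) :
    (((List.range 4).foldl (vertikaalAltStep x (r0 :: r1 :: r2 :: r3 :: rest) j) (t, 0)).1) =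
      vertikaalStep x (r0 :: r1 :: r2 :: r3 :: rest) t j := by
  simp only [show List.range 4 = [0, 1, 2, 3] from rfl, vertikaalAltStep, vertikaalStep,
    pvCell, List.foldl, List.getD_cons_zero, List.getD_cons_succ]
  by_cases e0 : r0.getD j 0 = x <;> by_cases e1 : r1.getD j 0 = x <;>
    by_cases e2 : r2.getD j 0 = x <;> by_cases e3 : r3.getD j 0 = x <;>
    simp_all <;> split_ifs <;> simp_all

theorem vertikaal_spec : Claim_equal_vertikaal := by
  intro x m hdom hpre
  unfold Spec_vertikaal
  obtain ⟨hlen, hl⟩ := hpre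
  rcases m with _ | ⟨r0, m⟩; · simp only [List.length_nil] at hlen; omega
  rcases m with _ | ⟨r1, m⟩; · simp only [List.length_cons, List.length_nil] at hlen; omega
  rcases m with _ | ⟨r2, m⟩; · simp only [List.length_cons, List.length_nil] at hlen; omega
  rcases m with _ | ⟨r3, rest⟩; · simp only [List.length_cons, List.length_nil] at hlen; omega
  have h0 := hl 0 (by simp); have h1 := hl 1 (by simp)
  have h2 := hl 2 (by simp); have h3 := hl 3 (by simp)
  simp only [List.getD_cons_zero, List.getD_cons_succ] at h0 h1 h2 h3
  have c : ∀ j ∈ [0, 1, 2, 3], ∀ t : Int,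
      (vertikaalAltStep x (r0 :: r1 :: r2 :: r3 :: rest) j
          (vertikaalAltStep x (r0 :: r1 :: r2 :: r3 :: rest) j
            (vertikaalAltStep x (r0 :: r1 :: r2 :: r3 :: rest) j
              (vertikaalAltStep x (r0 :: r1 :: r2 :: r3 :: rest) j (t, 0) 0) 1) 2) 3).1 =
        vertikaalStep x (r0 :: r1 :: r2 :: r3 :: rest) t j := by
    intro j hj t
    have h4 : j < 4 := by fin_cases hj <;> omega
    simpa [show List.range 4 = [0, 1, 2, 3] from rfl, List.foldl] using
      col_eq x j r0 r1 r2 r3 rest t (by omega) (by omega) (by omega) (by omega)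
  conv_rhs => rw [vertikaal_alt, show List.range 4 = [0, 1, 2, 3] from rfl]
  conv_lhs => rw [vertikaal, show List.range 4 = [0, 1, 2, 3] from rfl]
  simp only [List.foldl]
  rw [c 0 (by simp), c 1 (by simp), c 2 (by simp), c 3 (by simp)]
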